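-- pv_equiv track=rewrite | github.com/FegDotExe/RiPytizioni | Alberto/primaDiEPoi.py | primaDiEPoi
-- ===== SOURCE A (Python) =====
-- def primaDiEPoi(s, c):
--     output=""
--     for lettera in s:
--         if lettera<c:
--             output+=lettera
--     for lettera in s:
--         if lettera>=c:
--             output+=lettera
--     return output
-- ===== SOURCE B (Python) =====
-- def primaDiEPoi(s, c):
--     below = ""
--     rest = ""
--     for lettera in s:
--         if lettera < c:
--             below += lettera
--         else:
--             rest += lettera
--     return below + rest
-- ===== Notes on version B (the rewrite author's own statement) =====
-- stated objective: alternative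
-- what changed: Replaces A's two full scans of s (one collecting characters < c, a second collecting the rest) with a single scan that partitions each character into one of two buffers and concatenates them at the end.
import Mathlib
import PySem

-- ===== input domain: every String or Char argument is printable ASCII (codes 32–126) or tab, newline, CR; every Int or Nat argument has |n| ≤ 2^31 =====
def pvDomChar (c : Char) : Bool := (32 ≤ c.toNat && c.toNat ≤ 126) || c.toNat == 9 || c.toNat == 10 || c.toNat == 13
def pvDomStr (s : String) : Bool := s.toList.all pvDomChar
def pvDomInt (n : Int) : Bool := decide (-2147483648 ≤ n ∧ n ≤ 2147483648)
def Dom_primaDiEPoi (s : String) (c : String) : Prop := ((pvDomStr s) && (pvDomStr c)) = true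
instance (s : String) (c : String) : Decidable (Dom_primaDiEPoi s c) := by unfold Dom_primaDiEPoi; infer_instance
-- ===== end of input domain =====

-- B replaces A's two scans of s with a single scan partitioning into two buffers; same cost, different traversal.


-- ===== PORT A =====
-- Python iterates over s yielding 1-char strings; 'lettera < c' / 'lettera >= c' are Python's
-- code-point lexicographic string comparisons = Lean's '<' / '≤' on List Char (exact per PYSEM.md).
def primaDiEPoi (s : String) (c : String) : String :=
  let cl := c.toList
  let out1 := s.toList.foldl (fun acc ch => if [ch] < cl then acc ++ [ch] else acc) ([] : List Char)
  let out2 := s.toList.foldl (fun acc ch => if cl ≤ [ch] then acc ++ [ch] else acc) out1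
  String.ofList out2

-- ===== PORT B =====
def primaDiEPoi_alt (s : String) (c : String) : String :=
  let cl := c.toList
  let p := s.toList.foldl
      (fun (p : List Char × List Char) ch =>
        if [ch] < cl then (p.1 ++ [ch], p.2) else (p.1, p.2 ++ [ch]))
      (([] : List Char), ([] : List Char))
  String.ofList (p.1 ++ p.2)

-- ===== PRECONDITION & SPEC =====
def Spec_primaDiEPoi (s : String) (c : String) (out : String) : Prop := out = primaDiEPoi_alt s c
instance (s : String) (c : String) (out : String) : Decidable (Spec_primaDiEPoi s c out) := by unfold Spec_primaDiEPoi; infer_instance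

-- ===== CLAIM (what is proved, stated in full; the proofs are below) =====
def Claim_equal_primaDiEPoi : Prop := ∀ (s : String) (c : String), Dom_primaDiEPoi s c → Spec_primaDiEPoi s c (primaDiEPoi s c)

-- ===== LEMMAS AND PROOFS =====

-- B's single pass with a pair accumulator computes (filter p, filter ¬p).
theorem pair_foldl_partition (cl : List Char) (l : List Char) (a b : List Char) :
    l.foldl (fun (p : List Char × List Char) ch =>
        if [ch] < cl then (p.1 ++ [ch], p.2) else (p.1, p.2 ++ [ch])) (a, b)
    = (a ++ l.filter (fun ch => decide ([ch] < cl)),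
       b ++ l.filter (fun ch => decide (cl ≤ [ch]))) := by
  induction l generalizing a b with
  | nil => simp
  | cons x xs ih =>
    by_cases h : [x] < cl
    · simp [List.foldl_cons, h, ih, not_le.mpr h]
    · simp [List.foldl_cons, h, ih, not_lt.mp h]

-- ===== VERDICT (by name: the statement is the Claim_ definition above) =====
theorem primaDiEPoi_spec : Claim_equal_primaDiEPoi := by
  intro s c _
  unfold Spec_primaDiEPoi primaDiEPoi primaDiEPoi_alt
  simp only [PySem.List.foldl_append_ite_eq_filter, pair_foldl_partition, List.nil_append]
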